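-- pv_equiv track=rewrite | github.com/srinivasycplf8/LeetCode | 8cells.py | cellCompete
-- ===== SOURCE A (Python) =====
-- def cellCompete(states, days):
--     # WRITE YOUR CODE HERE
--     for i in range((days)):
--         temp=list(states)
--         if 0!=states[1]:
--             temp[0]=1
--         else:
--             temp[0]=0
--         for i in range(1,len(states)-1):
--
--             if states[i-1]==states[i+1]:
--                 temp[i]=0
--             elif states[i-1]!=states[i+1]:
--                 temp[i]=1
--         if 0!=states[len(states)-2]:
--             temp[len(states)-1]=1
--         else:
--             temp[len(states)-1]=0
--         states=temp
--     return states
-- ===== SOURCE B (Python) =====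
-- def cellCompete(states, days):
--     def step(s):
--         return [int(a != b) for a, b in zip([0] + s[:-1], s[1:] + [0])]
--     seen = {}
--     cur = list(states)
--     d = 0
--     while d < days:
--         key = tuple(cur)
--         if key in seen:
--             rem = (days - d) % (d - seen[key])
--             for _ in range(rem):
--                 cur = step(cur)
--             return cur
--         seen[key] = d
--         cur = step(cur)
--         d += 1
--     return cur
-- ===== Notes on version B (the rewrite author's own statement) =====
-- stated objective: alternative
-- what changed: B computes one generation as a single zip-comprehension over the two zero-padded shifted rows (instead of A's index loop with separate boundary cases) and memoizes seen states to jump the remaining days via modular arithmetic once the evolution repeats; the cycle jump only pays off when days exceeds the period, so no speed is claimed.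
import Mathlib
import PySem

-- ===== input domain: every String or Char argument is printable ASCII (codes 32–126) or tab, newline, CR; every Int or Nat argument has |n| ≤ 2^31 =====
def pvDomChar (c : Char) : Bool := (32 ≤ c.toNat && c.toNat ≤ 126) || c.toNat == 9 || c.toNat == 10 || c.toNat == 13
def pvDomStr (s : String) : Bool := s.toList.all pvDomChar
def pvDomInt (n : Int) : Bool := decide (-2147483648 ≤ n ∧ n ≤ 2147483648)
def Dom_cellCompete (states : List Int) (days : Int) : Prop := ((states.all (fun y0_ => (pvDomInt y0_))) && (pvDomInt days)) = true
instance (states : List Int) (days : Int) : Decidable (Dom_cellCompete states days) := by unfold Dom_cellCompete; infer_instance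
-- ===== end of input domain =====

-- B: one generation as a zip-comprehension over the zero-padded shifted rows, plus state memoization to jump ahead by the cycle length once the evolution repeats (an alternative algorithm; no speed claim).

-- ===== PORT A =====
-- one day of A's loop body: copy, set both boundaries, inner index loop over 1..len-2
def stepA (states : List Int) : List Int :=
  let temp := states
  let temp := if (0 : Int) ≠ PySem.List.pyGetD states 1 0 then temp.set 0 1 else temp.set 0 0
  let temp := (PySem.List.pyRange 1 ((states.length : Int) - 1) 1).foldl
      (fun t i =>
        if PySem.List.pyGetD states (i - 1) 0 = PySem.List.pyGetD states (i + 1) 0 then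
          t.set i.toNat 0
        else if PySem.List.pyGetD states (i - 1) 0 ≠ PySem.List.pyGetD states (i + 1) 0 then
          t.set i.toNat 1
        else t) temp
  if (0 : Int) ≠ PySem.List.pyGetD states ((states.length : Int) - 2) 0 then
    temp.set (states.length - 1) 1
  else
    temp.set (states.length - 1) 0

def cellCompete (states : List Int) (days : Int) : List Int :=
  (PySem.List.pyRange 0 days 1).foldl (fun s _ => stepA s) states

-- ===== PORT B =====
-- one generation: [int(a != b) for a, b in zip([0] + s[:-1], s[1:] + [0])]
def stepB (s : List Int) : List Int :=
  (List.zip ((0 : Int) :: PySem.List.slice s none (some (-1)))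
            (PySem.List.slice s (some 1) none ++ [(0 : Int)])).map
    (fun p => if p.1 ≠ p.2 then (1 : Int) else 0)

-- the while loop: seen maps a state to the day it was first seen
def goB (seen : PySem.Dict (List Int) Int) (cur : List Int) (d days : Int) : List Int :=
  if _h : d < days then
    match seen.get? cur with
    | some j =>
        let rem := PySem.Int.mod (days - d) (d - j)
        (PySem.List.pyRange 0 rem 1).foldl (fun s _ => stepB s) cur
    | none => goB (seen.insert cur d) (stepB cur) (d + 1) days
  else cur
termination_by (days - d).toNat
decreasing_by omega

def cellCompete_alt (states : List Int) (days : Int) : List Int :=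
  goB PySem.Dict.empty states 0 days

-- ===== PRECONDITION & SPEC =====
-- Pre_ excludes exactly the inputs where Python A raises IndexError: days > 0 with fewer than 2 cells (states[1] out of range).
def Pre_cellCompete (states : List Int) (days : Int) : Prop :=
  days ≤ 0 ∨ 2 ≤ states.length
instance (states : List Int) (days : Int) : Decidable (Pre_cellCompete states days) := by
  unfold Pre_cellCompete; infer_instance

def pvWitness_cellCompete : List Int × Int := ([1, 0, 1, 1], 3)

def Spec_cellCompete (states : List Int) (days : Int) (out : List Int) : Prop := out = cellCompete_alt states days
instance (states : List Int) (days : Int) (out : List Int) : Decidable (Spec_cellCompete states days out) := by unfold Spec_cellCompete; infer_instance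

-- ===== CLAIM (what is proved, stated in full; the proofs are below) =====
def Claim_equal_cellCompete : Prop := ∀ (states : List Int) (days : Int), Dom_cellCompete states days → Pre_cellCompete states days → Spec_cellCompete states days (cellCompete states days)

-- ===== LEMMAS AND PROOFS =====

-- a fold whose body ignores the element is function iteration
lemma foldl_const_iterate {α β : Type} (f : α → α) :
    ∀ (l : List β) (x : α), l.foldl (fun s _ => f s) x = f^[l.length] x := by
  intro l
  induction l with
  | nil => intro x; rfl
  | cons a t ih => intro x; simp [ih, Function.iterate_succ_apply]

-- reference form of one generation: cell i compares its (virtual-0-padded) neighbours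
def refCell (s : List Int) (i : Nat) : Int :=
  if (if i = 0 then 0 else s.getD (i - 1) 0) ≠ (if i = s.length - 1 then 0 else s.getD (i + 1) 0)
  then 1 else 0

def refStep (s : List Int) : List Int := (List.range s.length).map (refCell s)

lemma length_refStep (s : List Int) : (refStep s).length = s.length := by
  simp [refStep]

lemma stepB_eq_ref (s : List Int) (h : 1 ≤ s.length) : stepB s = refStep s := by
  unfold stepB refStep
  rw [PySem.List.slice_to_neg_one, PySem.List.slice_from_one]
  have hlen : (List.zip ((0 : Int) :: s.dropLast) (s.tail ++ [(0 : Int)])).length = s.length := by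
    simp [List.length_zip]; omega
  apply List.ext_getElem
  · simp [List.length_zip]; omega
  · intro i h1 h2
    simp only [List.getElem_map, List.getElem_zip, List.getElem_range]
    have hi : i < s.length := by simpa [hlen] using (by simpa using h1 : i < (List.zip ((0 : Int) :: s.dropLast) (s.tail ++ [(0 : Int)])).length)
    unfold refCell
    have hleft : ((0 : Int) :: s.dropLast)[i]'(by simp; omega) = (if i = 0 then 0 else s.getD (i - 1) 0) := by
      cases i with
      | zero => simp
      | succ n =>
          simp only [List.getElem_cons_succ]
          rw [List.getElem_dropLast, if_neg (by omega)]
          rw [List.getD_eq_getElem _ _ (by omega)]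
          simp
    have hright : (s.tail ++ [(0 : Int)])[i]'(by simp; omega) = (if i = s.length - 1 then 0 else s.getD (i + 1) 0) := by
      by_cases he : i = s.length - 1
      · rw [if_pos he]
        rw [List.getElem_append_right (by simp; omega)]
        simp
      · rw [if_neg he]
        rw [List.getElem_append_left (by simp; omega)]
        rw [List.getElem_tail, List.getD_eq_getElem _ _ (by omega)]
    simp only [hleft, hright]

lemma length_stepB (s : List Int) (h : 1 ≤ s.length) : (stepB s).length = s.length := by
  rw [stepB_eq_ref s h, length_refStep]

-- the inner loop writes g i at every index 1 ≤ i < 1+m (Int indices), length preserved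
lemma foldl_set_length (g : Int → Int) (l : List Int) :
    ∀ (init : List Int), (l.foldl (fun t i => t.set i.toNat (g i)) init).length = init.length := by
  induction l with
  | nil => intro init; rfl
  | cons a t ih => intro init; rw [List.foldl_cons, ih]; simp

lemma foldl_set_getElem? (g : Int → Int) :
    ∀ (m : Nat) (init : List Int) (k : Nat),
      ((PySem.List.pyRange 1 (1 + (m : Int)) 1).foldl (fun t i => t.set i.toNat (g i)) init)[k]? =
        if 1 ≤ k ∧ k < 1 + m ∧ k < init.length then some (g k) else init[k]? := by
  intro m
  induction m with
  | zero =>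
      intro init k
      rw [show ((1 : Int) + (0 : Nat) : Int) = 1 by norm_num, PySem.List.pyRange_one_eq_nil le_rfl]
      simp only [List.foldl_nil]
      rw [if_neg (by omega)]
  | succ m ih =>
      intro init k
      have hsplit : PySem.List.pyRange 1 (1 + ((m + 1 : Nat) : Int)) 1
          = PySem.List.pyRange 1 (1 + (m : Int)) 1 ++ [(1 + (m : Int))] := by
        rw [show (1 + ((m + 1 : Nat) : Int)) = (1 + (m : Int)) + 1 by push_cast; ring]
        exact PySem.List.pyRange_one_succ_right (by omega)
      rw [hsplit, List.foldl_append]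
      simp only [List.foldl_cons, List.foldl_nil]
      rw [List.getElem?_set]
      have htn : ((1 : Int) + (m : Int)).toNat = 1 + m := by omega
      rw [htn]
      by_cases hk : 1 + m = k
      · subst hk
        rw [if_pos rfl]
        rw [foldl_set_length]
        by_cases hlt : 1 + m < init.length
        · rw [if_pos hlt, if_pos (by omega)]
          norm_num
        · rw [if_neg hlt, if_neg (by omega)]
          exact (List.getElem?_eq_none (by omega)).symm
      · rw [if_neg hk, ih]
        by_cases h1 : 1 ≤ k ∧ k < 1 + m ∧ k < init.length
        · rw [if_pos h1, if_pos (by omega)]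
        · rw [if_neg h1, if_neg (by omega)]

lemma set_if_push (t : List Int) (x : Nat) (c : Prop) [Decidable c] :
    (if c then t.set x 1 else t.set x (0 : Int)) = t.set x (if c then 1 else 0) := by
  split_ifs <;> rfl

lemma stepA_eq_ref (s : List Int) (h : 2 ≤ s.length) : stepA s = refStep s := by
  unfold stepA
  simp only []
  rw [set_if_push, set_if_push]
  set b0 : Int := if (0 : Int) ≠ PySem.List.pyGetD s 1 0 then 1 else 0 with hb0
  set bl : Int := if (0 : Int) ≠ PySem.List.pyGetD s ((s.length : Int) - 2) 0 then 1 else 0 with hbl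
  set g : Int → Int := fun i =>
    if PySem.List.pyGetD s (i - 1) 0 = PySem.List.pyGetD s (i + 1) 0 then 0 else 1 with hg
  have hbody : (PySem.List.pyRange 1 ((s.length : Int) - 1) 1).foldl
      (fun t i =>
        if PySem.List.pyGetD s (i - 1) 0 = PySem.List.pyGetD s (i + 1) 0 then
          t.set i.toNat 0
        else if PySem.List.pyGetD s (i - 1) 0 ≠ PySem.List.pyGetD s (i + 1) 0 then
          t.set i.toNat 1
        else t) (s.set 0 b0)
      = (PySem.List.pyRange 1 ((s.length : Int) - 1) 1).foldl
        (fun t i => t.set i.toNat (g i)) (s.set 0 b0) := by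
    apply PySem.List.foldl_congr_mem
    intro acc x _
    by_cases hc : PySem.List.pyGetD s (x - 1) 0 = PySem.List.pyGetD s (x + 1) 0
    · simp [hg, hc]
    · simp [hg, hc]
  rw [hbody]
  have hcast : ((s.length : Int) - 1) = 1 + ((s.length - 2 : Nat) : Int) := by omega
  rw [hcast]
  apply List.ext_getElem?
  intro k
  rw [List.getElem?_set, foldl_set_length, List.length_set, foldl_set_getElem? g (s.length - 2)]
  rw [refStep]
  by_cases hk : k < s.length
  · rw [List.getElem?_map, List.getElem?_range hk]
    simp only [Option.map_some]
    by_cases hk1 : s.length - 1 = k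
    · -- last cell
      rw [if_pos hk1, if_pos (show s.length - 1 < s.length by omega)]
      congr 1
      simp only [refCell, if_neg (show ¬ k = 0 by omega), if_pos (show k = s.length - 1 by omega)]
      rw [hbl, PySem.List.pyGetD_of_nonneg s _ (by omega)]
      have he : ((s.length : Int) - 2).toNat = k - 1 := by omega
      rw [he]
      simp [ne_comm]
    · rw [if_neg hk1]
      by_cases hmid : 1 ≤ k ∧ k < 1 + (s.length - 2) ∧ k < (s.set 0 b0).length
      · rw [if_pos hmid]
        congr 1
        simp only [hg, refCell, if_neg (show ¬ k = 0 by omega),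
          if_neg (show ¬ k = s.length - 1 by omega)]
        rw [PySem.List.pyGetD_of_nonneg s _ (by omega), PySem.List.pyGetD_of_nonneg s _ (by omega)]
        have e1 : ((k : Int) - 1).toNat = k - 1 := by omega
        have e2 : ((k : Int) + 1).toNat = k + 1 := by omega
        rw [e1, e2]
        by_cases hc : s.getD (k - 1) 0 = s.getD (k + 1) 0
        · simp
        · simp [List.getD] at hc ⊢
      · -- k = 0
        have hk0 : k = 0 := by
          rcases Nat.eq_zero_or_pos k with h0 | h1
          · exact h0
          · exfalso; exact hmid ⟨h1, by omega, by simp [List.length_set]; omega⟩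
        subst hk0
        rw [if_neg hmid, List.getElem?_set, if_pos rfl, if_pos (by omega)]
        congr 1
        simp only [hb0, refCell, if_neg (show ¬ (0 : Nat) = s.length - 1 by omega)]
        rw [PySem.List.pyGetD_of_nonneg s _ (by omega)]
        norm_num
  · rw [if_neg (by omega), if_neg (by omega), List.getElem?_set, if_neg (by omega)]
    rw [List.getElem?_eq_none (by omega), List.getElem?_eq_none (by simp; omega)]

lemma iterA_eq_iterB (k : Nat) :
    ∀ (s : List Int), 2 ≤ s.length → stepA^[k] s = stepB^[k] s := by
  induction k with
  | zero => intro s _; rfl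
  | succ k ih =>
      intro s hs
      rw [Function.iterate_succ_apply, Function.iterate_succ_apply]
      rw [stepA_eq_ref s hs, ← stepB_eq_ref s (by omega)]
      exact ih _ (by rw [length_stepB s (by omega)]; omega)

lemma periodic_ge {α : Type} (f : α → α) (s0 : α) (j c : Nat)
    (hp : f^[j + c] s0 = f^[j] s0) : ∀ m, j ≤ m → f^[m + c] s0 = f^[m] s0 := by
  intro m hm
  obtain ⟨k, rfl⟩ := Nat.exists_eq_add_of_le hm
  have h1 : j + k + c = k + (j + c) := by omega
  have h2 : j + k = k + j := by omega
  rw [h1, Function.iterate_add_apply, hp, ← Function.iterate_add_apply, ← h2]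

lemma periodic_mul {α : Type} (f : α → α) (s0 : α) (j c : Nat)
    (hp : f^[j + c] s0 = f^[j] s0) :
    ∀ (q : Nat) (m : Nat), j ≤ m → f^[m + q * c] s0 = f^[m] s0 := by
  intro q
  induction q with
  | zero => intro m _; simp
  | succ q ih =>
      intro m hm
      have h1 : m + (q + 1) * c = (m + q * c) + c := by ring
      rw [h1, periodic_ge f s0 j c hp (m + q * c) (by omega), ih m hm]

lemma goB_eq (s0 : List Int) :
    ∀ (fuel : Nat) (seen : PySem.Dict (List Int) Int) (d days : Int),
      0 ≤ d → d ≤ days → (days - d).toNat = fuel →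
      (∀ x jj, seen.get? x = some jj → 0 ≤ jj ∧ jj < d ∧ stepB^[jj.toNat] s0 = x) →
      goB seen (stepB^[d.toNat] s0) d days = stepB^[days.toNat] s0 := by
  intro fuel
  induction fuel with
  | zero =>
      intro seen d days hd hdays hfuel _hseen
      have hde : d = days := by omega
      rw [goB]
      simp [hde]
  | succ fuel ih =>
      intro seen d days hd hdays hfuel hseen
      have hlt : d < days := by omega
      rw [goB, dif_pos hlt]
      cases hget : seen.get? (stepB^[d.toNat] s0) with
      | none =>
          have hstep : stepB (stepB^[d.toNat] s0) = stepB^[(d + 1).toNat] s0 := by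
            have : (d + 1).toNat = d.toNat + 1 := by omega
            rw [this, Function.iterate_succ_apply']
          rw [hstep]
          apply ih _ (d + 1) days (by omega) (by omega) (by omega)
          intro x jj hx
          rw [PySem.Dict.get?_insert] at hx
          by_cases hxc : x = stepB^[d.toNat] s0
          · rw [if_pos hxc] at hx
            obtain rfl : jj = d := by injection hx with h; omega
            exact ⟨hd, by omega, hxc.symm⟩
          · rw [if_neg hxc] at hx
            obtain ⟨h1, h2, h3⟩ := hseen x jj hx
            exact ⟨h1, by omega, h3⟩
      | some j =>
          obtain ⟨hj0, hjd, hjit⟩ := hseen _ j hget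
          have hc : (0 : Int) < d - j := by omega
          show List.foldl (fun s _ => stepB s) (stepB^[d.toNat] s0)
              (PySem.List.pyRange 0 (PySem.Int.mod (days - d) (d - j))) = stepB^[days.toNat] s0
          rw [foldl_const_iterate, PySem.List.length_pyRange_one]
          rw [PySem.Int.mod_eq_emod_of_pos hc]
          have hr0 : 0 ≤ (days - d) % (d - j) := Int.emod_nonneg _ (by omega)
          have hrc : (days - d) % (d - j) < d - j := Int.emod_lt_of_pos _ hc
          have hdm : (d - j) * ((days - d) / (d - j)) + (days - d) % (d - j) = days - d :=
            Int.mul_ediv_add_emod _ _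
          have hq0 : 0 ≤ (days - d) / (d - j) := Int.ediv_nonneg (by omega) (by omega)
          set r : Nat := ((days - d) % (d - j)).toNat with hrdef
          set q : Nat := ((days - d) / (d - j)).toNat with hqdef
          set c : Nat := (d - j).toNat with hcdef
          have hper : stepB^[j.toNat + c] s0 = stepB^[j.toNat] s0 := by
            have : j.toNat + c = d.toNat := by omega
            rw [this, hjit]
          have hdays' : days.toNat = (d.toNat + r) + q * c := by
            have : (q : Int) * (c : Int) = (d - j) * ((days - d) / (d - j)) := by
              rw [hqdef, hcdef]
              rw [Int.toNat_of_nonneg hq0, Int.toNat_of_nonneg (by omega)]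
              ring
            omega
          have key := periodic_mul stepB s0 j.toNat c hper q (d.toNat + r) (by omega)
          rw [hdays', key]
          have hsub : (((days - d) % (d - j)) - 0).toNat = r := by omega
          rw [hsub, ← Function.iterate_add_apply]
          congr 1
          omega

-- ===== VERDICT (by name: the statement is the Claim_ definition above) =====
theorem cellCompete_spec : Claim_equal_cellCompete := by
  intro states days _hdom hpre
  unfold Spec_cellCompete cellCompete cellCompete_alt
  by_cases hdays : days ≤ 0
  · rw [PySem.List.pyRange_one_eq_nil hdays, goB, dif_neg (by omega)]
    rfl
  · have hlen : 2 ≤ states.length := by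
      cases hpre with
      | inl h => omega
      | inr h => exact h
    rw [foldl_const_iterate, PySem.List.length_pyRange_one]
    have h0 : ((days : Int) - 0).toNat = days.toNat := by omega
    rw [h0, iterA_eq_iterB days.toNat states hlen]
    have := goB_eq states days.toNat PySem.Dict.empty 0 days (by omega) (by omega)
      (by omega) (by intro x jj hx; rw [PySem.Dict.get?_empty] at hx; exact absurd hx (by simp))
    simpa using this.symm
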